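-- pv_equiv track=rewrite | github.com/KIMJINOH97/Algorithm | python/Programmers/level3/shuttle_bus.py | solution
-- ===== SOURCE A (Python) =====
-- from collections import deque
--
-- def solution(n, t, m, timetable):
--
--     START_TIME = 540
--     LAST_BUS_TIME = START_TIME + (n-1) * t
--
--     def changeMinute(t):
--         hour, minute = map(int, t.split(":"))
--         return 60 * hour + minute
--
--     def changeClock(t):
--         hour = t // 60
--         minute = t - 60 * hour
--
--         if hour < 10:
--             hour = "0" + str(hour)
--
--         if minute < 10:
--             minute = "0" + str(minute)
--
--         return str(hour) + ":" + str(minute)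
--
--     timetable = sorted(list(map(lambda x: changeMinute(x), timetable)))
--
--     q = deque()
--
--     for time in timetable:
--         q.append(time)
--
--     presentBusTime = START_TIME
--
--     while presentBusTime <= LAST_BUS_TIME:
--         loadAble = m
--         while q and loadAble:
--             time = q[0]
--             if time > presentBusTime:
--                 break
--             time = q.popleft()
--             loadAble -= 1
--
--             if loadAble == 0 and presentBusTime == LAST_BUS_TIME:
--                 return changeClock(time - 1)
--
--         if len(q) == 0:
--             break
--
--         presentBusTime += t
--
--     return changeClock(LAST_BUS_TIME)
-- ===== SOURCE B (Python) =====
-- def solution(n, t, m, timetable):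
--     START_TIME = 540
--     LAST_BUS_TIME = START_TIME + (n - 1) * t
--
--     def changeMinute(t):
--         hour, minute = map(int, t.split(":"))
--         return 60 * hour + minute
--
--     def changeClock(t):
--         hour = t // 60
--         minute = t - 60 * hour
--         if hour < 10:
--             hour = "0" + str(hour)
--         if minute < 10:
--             minute = "0" + str(minute)
--         return str(hour) + ":" + str(minute)
--
--     crew = sorted(changeMinute(x) for x in timetable)
--
--     # earliest bus index departing at or after minute c (n = misses every bus)
--     def firstBus(c):
--         if c <= START_TIME:
--             return 0
--         i = -((START_TIME - c) // t)  # ceil((c - START_TIME) / t)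
--         return i if i < n else n
--
--     # bus[j] = index of the bus crew j boards (n = boards none):
--     # it must leave no earlier than crew j arrives, and strictly after
--     # the bus of crew j-m (each bus seats m crew).
--     bus = []
--     for j, c in enumerate(crew):
--         i = firstBus(c)
--         if 0 < m <= j:
--             i = max(i, bus[j - m] + 1)
--         bus.append(min(i, n))
--
--     lastBusCrew = [c for c, b in zip(crew, bus) if b == n - 1]
--     # a bus can only be full (blocking Con) when its capacity is positive
--     if len(lastBusCrew) == m > 0:
--         return changeClock(lastBusCrew[-1] - 1)
--     return changeClock(LAST_BUS_TIME)
-- ===== Notes on version B (the rewrite author's own statement) =====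
-- stated objective: alternative
-- what changed: B replaces the bus-by-bus deque simulation with a direct assignment pass over the sorted crew: bus[j] = min(n, max(first bus departing no earlier than crew j, bus[j-m]+1)), then reads the answer off the block of crew assigned to the last bus, never iterating over the n buses.
-- outside the precondition, e.g. on solution(2, 0, 1, ['10:00']): A does not finish within the time limit, B raises ZeroDivisionError; on solution(1, 0, 1, ['08:00', '10:00']): A returns '07:59', B raises ZeroDivisionError
import Mathlib
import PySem

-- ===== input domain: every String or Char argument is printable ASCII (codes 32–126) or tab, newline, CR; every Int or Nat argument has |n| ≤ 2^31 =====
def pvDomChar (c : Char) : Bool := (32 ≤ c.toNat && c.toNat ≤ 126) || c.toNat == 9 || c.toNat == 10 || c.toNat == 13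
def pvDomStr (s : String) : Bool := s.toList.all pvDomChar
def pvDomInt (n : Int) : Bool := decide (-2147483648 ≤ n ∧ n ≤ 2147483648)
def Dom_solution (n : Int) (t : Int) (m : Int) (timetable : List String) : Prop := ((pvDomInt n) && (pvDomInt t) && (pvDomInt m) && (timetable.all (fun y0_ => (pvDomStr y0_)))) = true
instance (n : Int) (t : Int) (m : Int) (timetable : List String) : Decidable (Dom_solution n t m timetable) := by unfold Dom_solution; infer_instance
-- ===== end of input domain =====

-- B replaces A's bus-by-bus deque simulation by a one-pass bus-index assignment over the
-- sorted crew (bus[j] = min(n, max(first bus not earlier than crew j, bus[j-m]+1))) and reads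
-- the answer off the last bus's block; equal return values on Pre_ (t ≥ 1, parseable "H:M" entries).


-- ===== PORT A =====
-- helpers shared verbatim by both Pythons (Source A and Source B define identical changeMinute/changeClock)
-- changeMinute: "H:M" -> minutes; default 0 is unreachable under Pre_ (Python raises ValueError there)
def changeMinuteP (s : String) : Int :=
  match ((PySem.Str.split? s ":").getD []).map PySem.Int.ofStr? with
  | [some h, some mi] => 60 * h + mi
  | _ => 0

def changeClockP (x : Int) : String :=
  let hour := PySem.Int.floordiv x 60
  let minute := x - 60 * hour
  let hs := if hour < 10 then "0" ++ PySem.Int.toStr hour else PySem.Int.toStr hour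
  let ms := if minute < 10 then "0" ++ PySem.Int.toStr minute else PySem.Int.toStr minute
  hs ++ ":" ++ ms

-- inner 'while q and loadAble' loop of A: pops the deque, may early-return
def innerA (present LAST : Int) : Int → List Int → String ⊕ List Int
  | _, [] => .inr []
  | loadAble, time :: rest =>
    if loadAble = 0 then .inr (time :: rest)
    else if time > present then .inr (time :: rest)
    else if loadAble - 1 = 0 ∧ present = LAST then .inl (changeClockP (time - 1))
    else innerA present LAST (loadAble - 1) rest

-- outer 'while presentBusTime <= LAST_BUS_TIME' loop; fuel n.toNat+1 covers every iteration when t ≥ 1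
def loopA (t m LAST : Int) : Nat → Int → List Int → String
  | 0, _, _ => changeClockP LAST
  | fuel + 1, present, q =>
    if present ≤ LAST then
      match innerA present LAST m q with
      | .inl ans => ans
      | .inr q' => if q'.length = 0 then changeClockP LAST else loopA t m LAST fuel (present + t) q'
    else changeClockP LAST

def solution (n : Int) (t : Int) (m : Int) (timetable : List String) : String :=
  let START_TIME : Int := 540
  let LAST_BUS_TIME : Int := START_TIME + (n - 1) * t
  let tt := PySem.List.sorted (timetable.map changeMinuteP) (fun x => x) false
  loopA t m LAST_BUS_TIME (n.toNat + 1) START_TIME tt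

-- ===== PORT B =====
-- earliest bus index departing at or after minute c (n = misses every bus)
def firstBusB (n t c : Int) : Int :=
  if c ≤ 540 then 0
  else
    let i := -(PySem.Int.floordiv (540 - c) t)
    if i < n then i else n

def solution_alt (n : Int) (t : Int) (m : Int) (timetable : List String) : String :=
  let START_TIME : Int := 540
  let LAST_BUS_TIME : Int := START_TIME + (n - 1) * t
  let crew := PySem.List.sorted (timetable.map changeMinuteP) (fun x => x) false
  let bus := (PySem.List.enumerate crew 0).foldl (fun bus jc =>
    let i := firstBusB n t jc.2
    let i := if 0 < m ∧ jc.1 ≥ m then max i (PySem.List.pyGetD bus (jc.1 - m) 0 + 1) else i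
    bus ++ [min i n]) []
  let lastBusCrew := ((crew.zip bus).filter (fun cb => cb.2 == n - 1)).map Prod.fst
  if (lastBusCrew.length : Int) = m ∧ m > 0 then changeClockP (PySem.List.pyGetD lastBusCrew (-1) 0 - 1)
  else changeClockP LAST_BUS_TIME

-- ===== PRECONDITION & SPEC =====
-- Pre_ excludes t ≤ 0 (A loops forever on most such inputs; B's ceiling division needs t ≥ 1)
-- and timetable entries that are not two int()-parseable ":"-separated fields (Python A raises ValueError).
def Pre_solution (n : Int) (t : Int) (m : Int) (timetable : List String) : Prop :=
  1 ≤ t ∧ ∀ s ∈ timetable,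
    ((PySem.Str.split? s ":").getD []).length = 2 ∧
    ∀ p ∈ (PySem.Str.split? s ":").getD [], (PySem.Int.ofStr? p).isSome = true

instance (n : Int) (t : Int) (m : Int) (timetable : List String) : Decidable (Pre_solution n t m timetable) := by
  unfold Pre_solution; infer_instance

def pvWitness_solution : Int × Int × Int × List String := (2, 10, 2, ["08:00", "09:05"])

def Spec_solution (n : Int) (t : Int) (m : Int) (timetable : List String) (out : String) : Prop := out = solution_alt n t m timetable
instance (n : Int) (t : Int) (m : Int) (timetable : List String) (out : String) : Decidable (Spec_solution n t m timetable out) := by unfold Spec_solution; infer_instance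

-- ===== CLAIM (what is proved, stated in full; the proofs are below) =====
def Claim_equal_solution : Prop := ∀ (n : Int) (t : Int) (m : Int) (timetable : List String), Dom_solution n t m timetable → Pre_solution n t m timetable → Spec_solution n t m timetable (solution n t m timetable)

-- ===== LEMMAS AND PROOFS =====

-- proof-side reference for B's fold: grow the bus-assignment list one crew member at a time
def stepB (n t m : Int) (acc : List Int) (cs : Int) : Int :=
  min (if 0 < m ∧ (acc.length : Int) ≥ m then max (firstBusB n t cs) (PySem.List.pyGetD acc ((acc.length : Int) - m) 0 + 1) else firstBusB n t cs) n

def busGrow (n t m : Int) : List Int → List Int → List Int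
  | acc, [] => acc
  | acc, cs :: l => busGrow n t m (acc ++ [stepB n t m acc cs]) l

def busVal (n t m : Int) (cs : List Int) (j : Nat) : Int := (busGrow n t m [] cs).getD j 0

-- B's final extraction, as a function of the assignment list
def extractB (n m LAST : Int) (cs bus : List Int) : String :=
  let lbc := ((cs.zip bus).filter (fun cb => cb.2 == n - 1)).map Prod.fst
  if (lbc.length : Int) = m ∧ m > 0 then changeClockP (PySem.List.pyGetD lbc (-1) 0 - 1) else changeClockP LAST

lemma foldB_eq_busGrow (n t m : Int) : ∀ (l acc : List Int) (s : Int), s = (acc.length : Int) →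
    (PySem.List.enumerate l s).foldl (fun bus jc =>
      bus ++ [min (if 0 < m ∧ jc.1 ≥ m then max (firstBusB n t jc.2) (PySem.List.pyGetD bus (jc.1 - m) 0 + 1)
                   else firstBusB n t jc.2) n]) acc = busGrow n t m acc l := by
  intro l
  induction l with
  | nil => intro acc s hs; rfl
  | cons x l ih =>
    intro acc s hs
    subst hs
    rw [PySem.List.enumerate_cons, List.foldl_cons, busGrow]
    rw [← ih (acc ++ [stepB n t m acc x]) ((acc.length : Int) + 1) (by simp)]
    rfl

lemma solution_alt_eq (n t m : Int) (timetable : List String) :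
    solution_alt n t m timetable =
      extractB n m (540 + (n - 1) * t)
        (PySem.List.sorted (timetable.map changeMinuteP) (fun x => x) false)
        (busGrow n t m [] (PySem.List.sorted (timetable.map changeMinuteP) (fun x => x) false)) := by
  have h := foldB_eq_busGrow n t m (PySem.List.sorted (timetable.map changeMinuteP) (fun x => x) false) [] 0 (by simp)
  simp only [solution_alt, extractB]
  rw [h]

lemma busGrow_length (n t m : Int) : ∀ (l acc : List Int), (busGrow n t m acc l).length = acc.length + l.length := by
  intro l
  induction l with
  | nil => intro acc; simp [busGrow]
  | cons x l ih =>
    intro acc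
    rw [busGrow, ih]
    simp [List.length_append]
    omega

lemma busGrow_getD_lt (n t m : Int) : ∀ (l acc : List Int) (j : Nat), j < acc.length →
    (busGrow n t m acc l).getD j 0 = acc.getD j 0 := by
  intro l
  induction l with
  | nil => intro acc j hj; rfl
  | cons x l ih =>
    intro acc j hj
    rw [busGrow, ih _ _ (by simp [List.length_append]; omega)]
    exact List.getD_append _ _ _ _ hj

lemma busGrow_append (n t m : Int) : ∀ (l1 l2 acc : List Int),
    busGrow n t m acc (l1 ++ l2) = busGrow n t m (busGrow n t m acc l1) l2 := by
  intro l1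
  induction l1 with
  | nil => intro l2 acc; rfl
  | cons x l1 ih =>
    intro l2 acc
    rw [List.cons_append, busGrow, busGrow, ih]

lemma busVal_rec (n t m : Int) (cs : List Int) (hm : 1 ≤ m) (j : Nat) (hj : j < cs.length) :
    busVal n t m cs j =
      min (if m.toNat ≤ j then max (firstBusB n t (cs[j]'hj)) (busVal n t m cs (j - m.toNat) + 1)
           else firstBusB n t (cs[j]'hj)) n := by
  have hsplit : cs = cs.take j ++ cs[j]'hj :: cs.drop (j + 1) := by
    rw [← List.drop_eq_getElem_cons hj, List.take_append_drop]
  set P := busGrow n t m [] (cs.take j) with hP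
  have hPlen : P.length = j := by
    rw [hP, busGrow_length]; simp [List.length_take]; omega
  have h1 : busGrow n t m [] cs = busGrow n t m (P ++ [stepB n t m P (cs[j]'hj)]) (cs.drop (j + 1)) := by
    conv_lhs => rw [hsplit]
    rw [busGrow_append]
    rfl
  have h2 : (P ++ [stepB n t m P (cs[j]'hj)]).getD j 0 = stepB n t m P (cs[j]'hj) := by
    have hlt : j < (P ++ [stepB n t m P (cs[j]'hj)]).length := by simp [hPlen]
    rw [List.getD_eq_getElem _ _ hlt]
    exact List.getElem_concat_length hPlen.symm hlt
  conv_lhs => rw [busVal, h1]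
  rw [busGrow_getD_lt n t m (cs.drop (j + 1)) (P ++ [stepB n t m P (cs[j]'hj)]) j
      (by simp [hPlen]), h2]
  unfold stepB
  rw [hPlen]
  by_cases hjm : (j : Int) ≥ m
  · have hjm' : m.toNat ≤ j := by omega
    have hmn : 1 ≤ m.toNat := by omega
    rw [if_pos ⟨by omega, hjm⟩, if_pos hjm']
    have h3 : busVal n t m cs (j - m.toNat) = P.getD (j - m.toNat) 0 := by
      unfold busVal
      rw [h1, busGrow_getD_lt n t m (cs.drop (j + 1)) (P ++ [stepB n t m P (cs[j]'hj)])
          (j - m.toNat) (by simp [hPlen])]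
      exact List.getD_append _ _ _ _ (by omega)
    have hge : (0 : Int) ≤ (j : Int) - m := by omega
    have hlt : (j : Int) - m < (P.length : Int) := by rw [hPlen]; omega
    rw [PySem.List.pyGetD_eq_getElem P 0 hge (by simpa using hlt)]
    have hidx : ((j : Int) - m).toNat = j - m.toNat := by omega
    simp only [hidx]
    rw [← List.getD_eq_getElem P 0 (by omega : j - m.toNat < P.length), ← h3]
  · rw [if_neg (fun h => hjm h.2), if_neg (by omega : ¬ m.toNat ≤ j)]

lemma firstBus_nonneg (n t cs : Int) (ht : 1 ≤ t) (hn : 1 ≤ n) : 0 ≤ firstBusB n t cs := by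
  simp only [firstBusB]
  split_ifs with h1 h2
  · omega
  · have hfd : PySem.Int.floordiv (540 - cs) t < 0 := by
      rw [PySem.Int.floordiv_lt_iff_lt_mul (by omega)]
      omega
    omega
  · omega

lemma firstBus_le_iff (n t cs i : Int) (ht : 1 ≤ t) (hi : 0 ≤ i) (hin : i ≤ n - 1) :
    firstBusB n t cs ≤ i ↔ cs ≤ 540 + i * t := by
  have ht0 : (0 : Int) < t := by omega
  have hit : 0 ≤ i * t := mul_nonneg hi (by omega)
  simp only [firstBusB]
  split_ifs with h1 h2
  · constructor
    · intro _; omega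
    · intro _; exact hi
  · have hiff : -i ≤ PySem.Int.floordiv (540 - cs) t ↔ -i * t ≤ 540 - cs :=
      PySem.Int.le_floordiv_iff_mul_le ht0
    constructor
    · intro h
      have := hiff.mp (by omega)
      nlinarith
    · intro h
      have : -i * t ≤ 540 - cs := by nlinarith
      have := hiff.mpr this
      omega
  · have hfd : PySem.Int.floordiv (540 - cs) t < -i := by
      by_contra hcon
      push_neg at hcon
      have := (PySem.Int.le_floordiv_iff_mul_le ht0).mp hcon
      omega
    have hiff : -i ≤ PySem.Int.floordiv (540 - cs) t ↔ -i * t ≤ 540 - cs :=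
      PySem.Int.le_floordiv_iff_mul_le ht0
    constructor
    · intro h; omega
    · intro h
      have : -i * t ≤ 540 - cs := by nlinarith
      have := hiff.mpr this
      omega

lemma busVal_nonneg (n t m : Int) (cs : List Int) (ht : 1 ≤ t) (hm : 1 ≤ m) (hn : 1 ≤ n)
    (j : Nat) (hj : j < cs.length) : 0 ≤ busVal n t m cs j := by
  rw [busVal_rec n t m cs hm j hj]
  have hf := firstBus_nonneg n t (cs[j]'hj) ht hn
  refine le_min ?_ (by omega)
  split_ifs with h
  · exact le_trans hf (le_max_left _ _)
  · exact hf

lemma busVal_of_nonpos (n t m : Int) (cs : List Int) (ht : 1 ≤ t) (hm : 1 ≤ m) (hn : n ≤ 0) :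
    ∀ (j : Nat), j < cs.length → busVal n t m cs j = n := by
  intro j
  induction j using Nat.strong_induction_on with
  | _ j ih =>
    intro hj
    rw [busVal_rec n t m cs hm j hj]
    have hfd : ∀ x : Int, n ≤ firstBusB n t x := by
      intro x
      simp only [firstBusB]
      split_ifs with h1 h2
      · omega
      · exfalso
        have : PySem.Int.floordiv (540 - x) t < 0 := by
          rw [PySem.Int.floordiv_lt_iff_lt_mul (by omega)]
          omega
        omega
      · omega
    have hf := hfd (cs[j]'hj)
    split_ifs with h
    · have hprev : busVal n t m cs (j - m.toNat) = n := ih (j - m.toNat) (by omega) (by omega)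
      rw [hprev]
      omega
    · omega

lemma takeWhile_boundary {α : Type} (p : α → Bool) (l : List α)
    (h : (l.takeWhile p).length < l.length) : p (l[(l.takeWhile p).length]'h) = false := by
  induction l with
  | nil => simp at h
  | cons x l ih =>
    by_cases hx : p x
    · have hlen : (List.takeWhile p (x :: l)).length = (List.takeWhile p l).length + 1 := by
        rw [List.takeWhile_cons_of_pos hx]; rfl
      have h' : (List.takeWhile p l).length < l.length := by
        simp only [List.length_cons, hlen] at h; omega
      simp only [hlen, List.getElem_cons_succ]
      exact ih h'
    · have hlen : (List.takeWhile p (x :: l)).length = 0 := by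
        rw [List.takeWhile_cons_of_neg hx]; rfl
      simp only [hlen, List.getElem_cons_zero]
      simpa using hx

lemma takeWhile_mem_sat {α : Type} (p : α → Bool) (l : List α) (r : Nat)
    (hr : r < (l.takeWhile p).length) :
    p (l[r]'(lt_of_lt_of_le hr (List.Sublist.length_le (List.takeWhile_sublist p)))) = true := by
  have hpre : l.takeWhile p <+: l := List.takeWhile_prefix p
  have hmem : (l.takeWhile p)[r] ∈ l.takeWhile p := List.getElem_mem _
  have hp := List.mem_takeWhile_imp hmem
  rwa [List.IsPrefix.getElem hpre hr] at hp

-- the step of the correspondence: at bus i, the crew boarding are exactly the block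
-- [idx, idx+k) of the assignment, and everyone after is assigned a strictly later bus
lemma block_step (n t m : Int) (cs : List Int) (ht : 1 ≤ t) (hm : 1 ≤ m)
    (hc : cs.Pairwise (· ≤ ·)) (i idx : Nat) (hin : (i : Int) ≤ n - 1) (hidx : idx ≤ cs.length)
    (H3 : ∀ j, j < idx → busVal n t m cs j < (i : Int))
    (H4 : ∀ j, idx ≤ j → j < cs.length → (i : Int) ≤ busVal n t m cs j) :
    (∀ j, idx ≤ j → j < idx + min m.toNat ((cs.drop idx).takeWhile (fun x => decide (x ≤ 540 + (i : Int) * t))).length → busVal n t m cs j = (i : Int)) ∧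
    (∀ j, idx + min m.toNat ((cs.drop idx).takeWhile (fun x => decide (x ≤ 540 + (i : Int) * t))).length ≤ j → j < cs.length → (i : Int) + 1 ≤ busVal n t m cs j) := by
  have hi0 : (0 : Int) ≤ (i : Int) := Int.natCast_nonneg i
  have hn1 : (1 : Int) ≤ n := by omega
  have hmono : ∀ (p q : Nat) (hpq : p ≤ q) (hq : q < cs.length), cs[p]'(by omega) ≤ cs[q]'hq := by
    intro p q hpq hq
    rcases Nat.lt_or_ge p q with h | h
    · exact (List.pairwise_iff_getElem.mp hc) p q (by omega) hq h
    · have hpq2 : p = q := by omega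
      subst hpq2
      exact le_refl _
  have htwle : ((cs.drop idx).takeWhile (fun x => decide (x ≤ 540 + (i : Int) * t))).length ≤ (cs.drop idx).length :=
    List.Sublist.length_le (List.takeWhile_sublist _)
  have hql : (cs.drop idx).length = cs.length - idx := List.length_drop
  set tw := ((cs.drop idx).takeWhile (fun x => decide (x ≤ 540 + (i : Int) * t))).length with htw
  constructor
  · intro j hj1 hj2
    have hjlen : j < cs.length := by omega
    have hr : j - idx < tw := by omega
    have hrq : j - idx < (cs.drop idx).length := by omega
    have hsat := takeWhile_mem_sat (fun x => decide (x ≤ 540 + (i : Int) * t)) (cs.drop idx) (j - idx) hr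
    rw [List.getElem_drop] at hsat
    have hcj : cs[j]'hjlen ≤ 540 + (i : Int) * t := by
      have : cs[idx + (j - idx)]'(by omega) ≤ 540 + (i : Int) * t := by simpa using hsat
      simpa [Nat.add_sub_cancel' hj1] using this
    have hf : firstBusB n t (cs[j]'hjlen) ≤ (i : Int) :=
      (firstBus_le_iff n t (cs[j]'hjlen) (i : Int) ht hi0 hin).mpr hcj
    have hlow := H4 j hj1 hjlen
    rw [busVal_rec n t m cs hm j hjlen] at hlow ⊢
    split_ifs with hbr
    · have hprev : busVal n t m cs (j - m.toNat) < (i : Int) := H3 _ (by omega)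
      rw [if_pos hbr] at hlow
      omega
    · rw [if_neg hbr] at hlow
      omega
  · intro j hj1 hj2
    have hjlen : j < cs.length := hj2
    by_cases hcase : m.toNat ≤ tw
    · have hk : min m.toNat tw = m.toNat := by omega
      rw [hk] at hj1
      have hbr : m.toNat ≤ j := by omega
      have hprev : (i : Int) ≤ busVal n t m cs (j - m.toNat) := H4 _ (by omega) (by omega)
      rw [busVal_rec n t m cs hm j hjlen, if_pos hbr]
      omega
    · have hk : min m.toNat tw = tw := by omega
      rw [hk] at hj1
      have hb : tw < (cs.drop idx).length := by omega
      have hbd := takeWhile_boundary (fun x => decide (x ≤ 540 + (i : Int) * t)) (cs.drop idx) (by rw [← htw]; exact hb)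
      have hbd2 : 540 + (i : Int) * t < (cs.drop idx)[tw]'hb := by
        simp only [← htw] at hbd
        simpa using hbd
      rw [List.getElem_drop] at hbd2
      have hcj : 540 + (i : Int) * t < cs[j]'hjlen := by
        have hmm := hmono (idx + tw) j (by omega) hjlen
        omega
      have hf : (i : Int) + 1 ≤ firstBusB n t (cs[j]'hjlen) := by
        have := (firstBus_le_iff n t (cs[j]'hjlen) (i : Int) ht hi0 hin).mp
        by_contra hcon
        have hle : firstBusB n t (cs[j]'hjlen) ≤ (i : Int) := by omega
        have := this hle
        omega
      rw [busVal_rec n t m cs hm j hjlen]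
      split_ifs with hbr
      · omega
      · omega

lemma innerA_zero (present LAST : Int) (q : List Int) : innerA present LAST 0 q = Sum.inr q := by
  cases q <;> simp [innerA]

lemma innerA_nonpos (present LAST : Int) : ∀ (q : List Int) (a : Int), a ≤ 0 →
    ∃ q', innerA present LAST a q = Sum.inr q' := by
  intro q
  induction q with
  | nil => intro a _; exact ⟨[], rfl⟩
  | cons time rest ih =>
    intro a ha
    rw [innerA]
    by_cases h0 : a = 0
    · rw [if_pos h0]; exact ⟨_, rfl⟩
    · rw [if_neg h0]
      by_cases h1 : time > present
      · rw [if_pos h1]; exact ⟨_, rfl⟩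
      · rw [if_neg h1, if_neg (fun hc => absurd hc.1 (by omega))]
        exact ih (a - 1) (by omega)

lemma loopA_clock (t m LAST : Int) (hm0 : m ≤ 0) : ∀ (fuel : Nat) (present : Int) (q : List Int),
    loopA t m LAST fuel present q = changeClockP LAST := by
  intro fuel
  induction fuel with
  | zero => intro present q; rfl
  | succ fuel ih =>
    intro present q
    rw [loopA]
    split_ifs with h1
    · obtain ⟨q', hq'⟩ := innerA_nonpos present LAST q m hm0
      rw [hq']
      show (if q'.length = 0 then changeClockP LAST else loopA t m LAST fuel (present + t) q') = changeClockP LAST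
      split_ifs with h2
      · rfl
      · exact ih _ _
    · rfl

lemma innerA_spec (present LAST : Int) : ∀ (q : List Int) (L : Nat), 1 ≤ L →
    innerA present LAST (L : Int) q =
      if present = LAST ∧ L ≤ (q.takeWhile (fun x => decide (x ≤ present))).length
      then Sum.inl (changeClockP (q.getD (L - 1) 0 - 1))
      else Sum.inr (q.drop (min L (q.takeWhile (fun x => decide (x ≤ present))).length)) := by
  intro q
  induction q with
  | nil =>
    intro L hL
    rw [if_neg (by simp; omega)]
    simp [innerA]
  | cons time rest ih =>
    intro L hL
    rw [innerA]
    rw [if_neg (by omega : ¬ (L : Int) = 0)]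
    by_cases htp : time > present
    · rw [if_pos htp]
      rw [List.takeWhile_cons_of_neg (by simpa using htp)]
      simp only [List.length_nil]
      rw [if_neg (by omega)]
      simp
    · rw [if_neg htp]
      push_neg at htp
      rw [List.takeWhile_cons_of_pos (by simpa using htp)]
      simp only [List.length_cons]
      by_cases hL1 : L = 1
      · subst hL1
        by_cases hpl : present = LAST
        · rw [if_pos (by norm_num [hpl])]
          rw [if_pos ⟨hpl, by omega⟩]
          simp
        · rw [if_neg (by simp [hpl])]
          rw [show ((1 : Nat) : Int) - 1 = 0 by norm_num, innerA_zero]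
          rw [if_neg (by simp [hpl])]
          have hmin : min 1 ((List.takeWhile (fun x => decide (x ≤ present)) rest).length + 1) = 1 := by omega
          rw [hmin]
          simp
      · have hL2 : 2 ≤ L := by omega
        rw [if_neg (by intro hcon; omega)]
        have hcast : (L : Int) - 1 = ((L - 1 : Nat) : Int) := by omega
        rw [hcast, ih (L - 1) (by omega)]
        by_cases hcond : present = LAST ∧ L - 1 ≤ (List.takeWhile (fun x => decide (x ≤ present)) rest).length
        · rw [if_pos hcond, if_pos ⟨hcond.1, by omega⟩]
          have hgd : (time :: rest).getD (L - 1) 0 = rest.getD (L - 1 - 1) 0 := by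
            rw [show L - 1 = (L - 2) + 1 by omega, List.getD_cons_succ]
            congr 1
          rw [hgd]
        · rw [if_neg hcond, if_neg (by intro hcon; exact hcond ⟨hcon.1, by omega⟩)]
          have hmin : min L ((List.takeWhile (fun x => decide (x ≤ present)) rest).length + 1)
              = (min (L - 1) (List.takeWhile (fun x => decide (x ≤ present)) rest).length) + 1 := by omega
          rw [hmin, List.drop_succ_cons]

lemma filter_block {α : Type} (v : Int) : ∀ (cs : List α) (bus : List Int) (lo hi : Nat),
    bus.length = cs.length → lo ≤ hi → hi ≤ cs.length →
    (∀ j, j < cs.length → (bus.getD j 0 = v ↔ (lo ≤ j ∧ j < hi))) →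
    ((cs.zip bus).filter (fun cb => cb.2 == v)).map Prod.fst = (cs.drop lo).take (hi - lo) := by
  intro cs
  induction cs with
  | nil =>
    intro bus lo hi hlen hlohi hhi h
    simp
  | cons x c ih =>
    intro bus lo hi hlen hlohi hhi h
    match bus with
    | b0 :: bus =>
      have hlen' : bus.length = c.length := by simpa using hlen
      simp only [List.zip_cons_cons, List.filter_cons]
      have h0 := h 0 (by simp)
      simp only [List.getD_cons_zero] at h0
      have htail : ∀ lo' hi', (∀ j, j + 1 < (x :: c).length → ((lo' + 1 ≤ j + 1 ∧ j + 1 < hi' + 1) ↔ (lo' ≤ j ∧ j < hi'))) := by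
        intro lo' hi' j _; omega
      match lo, hi, hlohi, hhi with
      | 0, 0, _, _ =>
        have hb0 : ¬ ((x, b0).2 == v) = true := by
          simp only [beq_iff_eq]
          intro he; have := h0.mp he; omega
        rw [if_neg hb0]
        have hres := ih bus 0 0 hlen' (le_refl 0) (by omega)
          (fun j hj => by
            have := h (j + 1) (by simpa using Nat.succ_lt_succ hj)
            simp only [List.getD_cons_succ] at this
            constructor
            · intro hv; have := this.mp hv; omega
            · intro hv; omega)
        simpa using hres
      | 0, hi + 1, _, hhi =>
        have hb0 : ((x, b0).2 == v) = true := by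
          simp only [beq_iff_eq]
          exact h0.mpr (by omega)
        rw [if_pos hb0]
        have hres := ih bus 0 hi hlen' (by omega) (by simpa using hhi)
          (fun j hj => by
            have := h (j + 1) (by simpa using Nat.succ_lt_succ hj)
            simp only [List.getD_cons_succ] at this
            constructor
            · intro hv; have := this.mp hv; omega
            · intro hv; exact this.mpr (by omega))
        simp only [List.map_cons, List.drop_zero, Nat.sub_zero] at hres ⊢
        rw [List.take_succ_cons, hres]
      | lo + 1, hi + 1, hlohi, hhi =>
        have hb0 : ¬ ((x, b0).2 == v) = true := by
          simp only [beq_iff_eq]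
          intro he; have := h0.mp he; omega
        rw [if_neg hb0]
        have hres := ih bus lo hi hlen' (by omega) (by simpa using hhi)
          (fun j hj => by
            have := h (j + 1) (by simpa using Nat.succ_lt_succ hj)
            simp only [List.getD_cons_succ] at this
            constructor
            · intro hv; have := this.mp hv; omega
            · intro hv; exact this.mpr (by omega))
        simp only [List.drop_succ_cons]
        have harith : hi + 1 - (lo + 1) = hi - lo := by omega
        rw [harith]
        exact hres

lemma loopA_eq_extract (n t m : Int) (cs : List Int) (ht : 1 ≤ t) (hm : 1 ≤ m) (hn : 1 ≤ n)
    (hc : cs.Pairwise (· ≤ ·)) :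
    ∀ (fuel i idx : Nat), n.toNat - i < fuel → (i : Int) ≤ n - 1 → idx ≤ cs.length →
    (∀ j, j < idx → busVal n t m cs j < (i : Int)) →
    (∀ j, idx ≤ j → j < cs.length → (i : Int) ≤ busVal n t m cs j) →
    loopA t m (540 + (n - 1) * t) fuel (540 + (i : Int) * t) (cs.drop idx) =
      extractB n m (540 + (n - 1) * t) cs (busGrow n t m [] cs) := by
  intro fuel
  induction fuel with
  | zero => intro i idx hfuel; omega
  | succ fuel ih =>
    intro i idx hfuel hin hidx H3 H4
    have hi0 : (0 : Int) ≤ (i : Int) := Int.natCast_nonneg i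
    have hilt : i < n.toNat := by omega
    have hbuslen : (busGrow n t m [] cs).length = cs.length := by
      rw [busGrow_length]; simp
    have hple : 540 + (i : Int) * t ≤ 540 + (n - 1) * t := by nlinarith
    obtain ⟨Ga, Gb⟩ := block_step n t m cs ht hm hc i idx hin hidx H3 H4
    have htwle : ((cs.drop idx).takeWhile (fun x => decide (x ≤ 540 + (i : Int) * t))).length ≤ (cs.drop idx).length :=
      List.Sublist.length_le (List.takeWhile_sublist _)
    have hql : (cs.drop idx).length = cs.length - idx := List.length_drop
    set tw := ((cs.drop idx).takeWhile (fun x => decide (x ≤ 540 + (i : Int) * t))).length with htw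
    have hspec := innerA_spec (540 + (i : Int) * t) (540 + (n - 1) * t) (cs.drop idx) m.toNat (by omega)
    rw [show ((m.toNat : Nat) : Int) = m by omega] at hspec
    rw [loopA, if_pos hple, hspec]
    by_cases hfin : 540 + (i : Int) * t = 540 + (n - 1) * t ∧ m.toNat ≤ tw
    · -- the last bus fills: A returns early, B's last-bus block has exactly m crew
      have hieq : (i : Int) = n - 1 := by
        have := hfin.1
        have h2 : (i : Int) * t = (n - 1) * t := by omega
        exact mul_right_cancel₀ (by omega) h2
      have hblock : idx + m.toNat ≤ cs.length := by omega
      have hfb := filter_block (n - 1) cs (busGrow n t m [] cs) idx (idx + m.toNat)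
        hbuslen (by omega) hblock
        (fun j hj => by
          constructor
          · intro hv
            by_contra hcon
            rcases Nat.lt_or_ge j idx with hlt | hge
            · have := H3 j hlt
              rw [show (busGrow n t m [] cs).getD j 0 = busVal n t m cs j from rfl] at hv
              omega
            · have hj2 : idx + min m.toNat tw ≤ j := by omega
              have := Gb j hj2 hj
              rw [show (busGrow n t m [] cs).getD j 0 = busVal n t m cs j from rfl] at hv
              omega
          · intro hj3
            have := Ga j hj3.1 (by omega)
            rw [show (busGrow n t m [] cs).getD j 0 = busVal n t m cs j from rfl]
            omega)
      rw [if_pos ⟨hfin.1, hfin.2⟩]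
      show changeClockP ((cs.drop idx).getD (m.toNat - 1) 0 - 1) =
        extractB n m (540 + (n - 1) * t) cs (busGrow n t m [] cs)
      simp only [extractB]
      rw [hfb]
      have hlen1 : ((cs.drop idx).take (idx + m.toNat - idx)).length = m.toNat := by
        simp [List.length_take, List.length_drop]
        omega
      rw [if_pos ⟨by rw [hlen1]; omega, by omega⟩]
      have hne : (cs.drop idx).take (idx + m.toNat - idx) ≠ [] := by
        intro hcon
        have := congrArg List.length hcon
        rw [hlen1] at this
        simp at this
        omega
      rw [PySem.List.pyGetD_neg_one _ _ hne]
      congr 1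
      have hlast : ((cs.drop idx).take (idx + m.toNat - idx)).getLast hne =
          (cs.drop idx).getD (m.toNat - 1) 0 := by
        rw [List.getLast_eq_getElem, List.getElem_take]
        rw [List.getD_eq_getElem _ _ (by omega)]
        congr 1
        rw [hlen1]
      rw [hlast]
    · rw [if_neg hfin]
      have hdd : (cs.drop idx).drop (min m.toNat tw) = cs.drop (idx + min m.toNat tw) := by
        rw [List.drop_drop]
      show (if ((cs.drop idx).drop (min m.toNat tw)).length = 0 then changeClockP (540 + (n - 1) * t)
            else loopA t m (540 + (n - 1) * t) fuel (540 + (i : Int) * t + t) ((cs.drop idx).drop (min m.toNat tw))) =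
        extractB n m (540 + (n - 1) * t) cs (busGrow n t m [] cs)
      by_cases hieq : (i : Int) = n - 1
      · -- last bus, but it does not fill: everyone left is stuck; both sides give the last departure
        have htwm : tw < m.toNat := by
          rcases Nat.lt_or_ge tw m.toNat with h | h
          · exact h
          · exact absurd ⟨by rw [hieq], h⟩ hfin
        have hmin : min m.toNat tw = tw := by omega
        have hfb := filter_block (n - 1) cs (busGrow n t m [] cs) idx (idx + tw)
          hbuslen (by omega) (by omega)
          (fun j hj => by
            constructor
            · intro hv
              by_contra hcon
              rcases Nat.lt_or_ge j idx with hlt | hge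
              · have := H3 j hlt
                rw [show (busGrow n t m [] cs).getD j 0 = busVal n t m cs j from rfl] at hv
                omega
              · have hj2 : idx + min m.toNat tw ≤ j := by omega
                have := Gb j hj2 hj
                rw [show (busGrow n t m [] cs).getD j 0 = busVal n t m cs j from rfl] at hv
                omega
            · intro hj3
              have := Ga j hj3.1 (by omega)
              rw [show (busGrow n t m [] cs).getD j 0 = busVal n t m cs j from rfl]
              omega)
        have hrhs : extractB n m (540 + (n - 1) * t) cs (busGrow n t m [] cs) =
            changeClockP (540 + (n - 1) * t) := by
          simp only [extractB]
          rw [hfb]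
          rw [if_neg (by
            simp [List.length_take, List.length_drop]
            omega)]
        rw [hrhs]
        split_ifs with hlen0
        · rfl
        · obtain ⟨fuel2, rfl⟩ : ∃ f2, fuel = f2 + 1 := by
            cases fuel
            · omega
            · exact ⟨_, rfl⟩
          rw [loopA, if_neg (by rw [hieq]; intro hcon; linarith)]
      · have hilt2 : (i : Int) < n - 1 := by omega
        by_cases hlen0 : ((cs.drop idx).drop (min m.toNat tw)).length = 0
        · rw [if_pos hlen0]
          have hall : idx + min m.toNat tw ≥ cs.length := by
            rw [hdd, List.length_drop] at hlen0
            omega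
          have hfb := filter_block (n - 1) cs (busGrow n t m [] cs) 0 0
            hbuslen (le_refl 0) (by omega)
            (fun j hj => by
              constructor
              · intro hv
                exfalso
                rw [show (busGrow n t m [] cs).getD j 0 = busVal n t m cs j from rfl] at hv
                rcases Nat.lt_or_ge j idx with hlt | hge
                · have := H3 j hlt; omega
                · have := Ga j hge (by omega); omega
              · intro hj3; omega)
          have hrhs : extractB n m (540 + (n - 1) * t) cs (busGrow n t m [] cs) =
              changeClockP (540 + (n - 1) * t) := by
            simp only [extractB]
            rw [hfb]
            rw [if_neg (by simp; omega)]
          rw [hrhs]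
        · rw [if_neg hlen0, hdd]
          have hstep : 540 + (i : Int) * t + t = 540 + ((i + 1 : Nat) : Int) * t := by
            push_cast
            ring
          rw [hstep]
          have hrem : idx + min m.toNat tw ≤ cs.length := by omega
          apply ih (i + 1) (idx + min m.toNat tw) (by omega) (by push_cast; omega) hrem
          · intro j hj
            rcases Nat.lt_or_ge j idx with hlt | hge
            · have := H3 j hlt; push_cast; omega
            · have := Ga j hge hj; push_cast; omega
          · intro j hj1 hj2
            have := Gb j hj1 hj2
            push_cast
            omega

-- ===== VERDICT (by name: the statement is the Claim_ definition above) =====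
theorem solution_spec : Claim_equal_solution := by
  intro n t m timetable hdom hpre
  obtain ⟨ht, hparse⟩ := hpre
  show solution n t m timetable = solution_alt n t m timetable
  rw [solution_alt_eq]
  simp only [solution]
  set tt := PySem.List.sorted (timetable.map changeMinuteP) (fun x => x) false with htt
  rcases (by omega : m ≤ 0 ∨ 1 ≤ m) with hm0 | hm
  · -- non-positive capacity: A never fills a bus and returns the last departure; so does B
    rw [loopA_clock t m _ hm0]
    simp only [extractB]
    rw [if_neg (fun h => absurd h.2 (by omega))]
  · have hc : tt.Pairwise (· ≤ ·) := by
      have := PySem.List.sorted_pairwise (xs := timetable.map changeMinuteP) (key := fun x => x)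
      simpa [htt] using this
    rcases (by omega : n ≤ 0 ∨ 0 < n) with hn0 | hn1
    · -- n ≤ 0: the loop never runs in A, and no crew is assigned bus n-1 in B
      have hlast : (n - 1) * t ≤ -1 := by nlinarith
      rw [loopA, if_neg (by intro hcon; linarith)]
      have hfilter : ((tt.zip (busGrow n t m [] tt)).filter (fun cb => cb.2 == n - 1)) = [] := by
        rw [List.filter_eq_nil_iff]
        intro cb hcb
        have h2 := List.of_mem_zip hcb
        obtain ⟨jj, hjj, hv⟩ := List.mem_iff_getElem.mp h2.2
        have hlen : (busGrow n t m [] tt).length = tt.length := by rw [busGrow_length]; simp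
        have hval : busVal n t m tt jj = n := busVal_of_nonpos n t m tt ht hm hn0 jj (by omega)
        have hgd : (busGrow n t m [] tt)[jj] = busVal n t m tt jj := by
          unfold busVal
          rw [List.getD_eq_getElem _ _ hjj]
        simp only [beq_iff_eq]
        rw [← hv, hgd, hval]
        omega
      simp only [extractB]
      rw [hfilter]
      simp only [List.map_nil, List.length_nil]
      rw [if_neg (by simp; omega)]
    · have hE := loopA_eq_extract n t m tt ht hm (by omega) hc (n.toNat + 1) 0 0 (by omega)
        (by simp; omega) (by omega)
        (fun j hj => absurd hj (Nat.not_lt_zero j))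
        (fun j _ hj => by simpa using busVal_nonneg n t m tt ht hm (by omega) j hj)
      simp only [Nat.cast_zero, zero_mul, add_zero, List.drop_zero] at hE
      exact hE
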